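-- pv_equiv track=rewrite | github.com/malkaenoor/payload-generator | core/obfuscation.py | insert_comments
-- ===== SOURCE A (Python) =====
-- def insert_comments(s: str, token='/*X*/', pos_list=None):
--     # Insert token at positions (pos_list is list of indices)
--     if pos_list is None:
--         pos_list = [len(s)//2]
--     res = []
--     last = 0
--     for p in sorted(set([p for p in pos_list if 0 <= p <= len(s)])):
--         res.append(s[last:p])
--         res.append(token)
--         last = p
--     res.append(s[last:])
--     return ''.join(res)
-- ===== SOURCE B (Python) =====
-- def insert_comments(s: str, token='/*X*/', pos_list=None):
--     # Splice the token in at each position, highest first, so earlier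
--     # offsets stay valid while the result string grows.
--     if pos_list is None:
--         pos_list = [len(s) // 2]
--     result = s
--     for p in sorted({p for p in pos_list if 0 <= p <= len(s)}, reverse=True):
--         result = result[:p] + token + result[p:]
--     return result
-- ===== Notes on version B (the rewrite author's own statement) =====
-- stated objective: alternative
-- what changed: Instead of one ascending pass collecting between-cut slices of the original string into a list that is joined at the end, B walks the unique in-range positions in DESCENDING order and splices the token directly into a growing result string, which works because high-first insertion keeps lower offsets unchanged.
import Mathlib
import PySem

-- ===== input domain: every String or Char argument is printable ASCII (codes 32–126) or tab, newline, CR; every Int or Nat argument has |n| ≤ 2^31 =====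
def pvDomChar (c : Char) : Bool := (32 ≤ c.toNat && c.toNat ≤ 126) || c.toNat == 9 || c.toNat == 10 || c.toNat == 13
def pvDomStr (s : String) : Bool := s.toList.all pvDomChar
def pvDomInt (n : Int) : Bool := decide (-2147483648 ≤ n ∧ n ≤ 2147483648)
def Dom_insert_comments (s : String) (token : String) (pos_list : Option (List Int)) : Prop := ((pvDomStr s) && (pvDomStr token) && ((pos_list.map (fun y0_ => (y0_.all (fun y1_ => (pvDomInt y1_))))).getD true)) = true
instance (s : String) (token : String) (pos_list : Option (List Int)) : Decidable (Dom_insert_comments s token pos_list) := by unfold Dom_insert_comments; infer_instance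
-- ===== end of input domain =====

-- B splices the token into a growing result string at the unique in-range
-- positions in DESCENDING order, instead of A's ascending slice-and-join pass
-- (objective: alternative decomposition; same observable behaviour).

-- ===== PORT A =====
-- literal transliteration of A: ascending pass, list of slices + tokens, joined
def insert_comments (s : String) (token : String) (pos_list : Option (List Int)) : String :=
  let cs := s.toList
  let ps := pos_list.getD [PySem.Int.floordiv (cs.length : Int) 2]
  let filtered := ps.filter (fun p => decide (0 ≤ p) && decide (p ≤ (cs.length : Int)))
  let sortedPs := PySem.List.sorted (PySem.Set.ofList filtered) (fun x => x) false
  let step := sortedPs.foldl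
    (fun (acc : List (List Char) × Int) p =>
      (acc.1 ++ [PySem.List.slice cs (some acc.2) (some p)] ++ [token.toList], p))
    ([], 0)
  String.ofList ((step.1 ++ [PySem.List.slice cs (some step.2) none]).flatten)

-- ===== PORT B =====
-- literal transliteration of B: descending splice into a growing result
def insert_comments_alt (s : String) (token : String) (pos_list : Option (List Int)) : String :=
  let cs := s.toList
  let ps := pos_list.getD [PySem.Int.floordiv (cs.length : Int) 2]
  let descPs := PySem.List.sorted
    (PySem.Set.ofList (ps.filter (fun p => decide (0 ≤ p) && decide (p ≤ (cs.length : Int)))))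
    (fun x => x) true
  String.ofList (descPs.foldl
    (fun res p => PySem.List.slice res none (some p) ++ token.toList ++ PySem.List.slice res (some p) none)
    cs)

-- ===== PRECONDITION & SPEC =====
def Spec_insert_comments (s : String) (token : String) (pos_list : Option (List Int)) (out : String) : Prop := out = insert_comments_alt s token pos_list
instance (s : String) (token : String) (pos_list : Option (List Int)) (out : String) : Decidable (Spec_insert_comments s token pos_list out) := by unfold Spec_insert_comments; infer_instance

-- ===== CLAIM (what is proved, stated in full; the proofs are below) =====
def Claim_equal_insert_comments : Prop := ∀ (s : String) (token : String) (pos_list : Option (List Int)), Dom_insert_comments s token pos_list → Spec_insert_comments s token pos_list (insert_comments s token pos_list)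

-- ===== LEMMAS AND PROOFS =====

-- A's segment decomposition, over Nat positions
def pvSegs (cs tok : List Char) : Nat → List Nat → List Char
  | last, [] => cs.drop last
  | last, p :: ps => (cs.drop last).take (p - last) ++ tok ++ pvSegs cs tok p ps

-- B's splice step, over Nat positions
def pvSplice (tok r : List Char) (q : Nat) : List Char := r.take q ++ tok ++ r.drop q

-- L: peeling the largest position off the back of the segment decomposition
theorem pvSegs_snoc (cs tok : List Char) (last q : Nat) (ps : List Nat)
    (hq : ∀ x ∈ ps, x ≤ q) :
    pvSegs cs tok last (ps ++ [q]) = pvSegs (cs.take q) tok last ps ++ tok ++ cs.drop q := by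
  induction ps generalizing last with
  | nil =>
      simp [pvSegs, List.drop_take]
  | cons p ps ih =>
      have hpq : p ≤ q := hq p (by simp)
      simp only [List.cons_append, pvSegs, ih p (fun x hx => hq x (by simp [hx]))]
      have : ((cs.take q).drop last).take (p - last) = (cs.drop last).take (p - last) := by
        rw [List.drop_take, List.take_take]
        congr 1
        omega
      rw [this]
      simp

-- M: descending splices into (u ++ r) realise A's segment decomposition of u
theorem pvSplice_reverse (tok : List Char) (ps : List Nat) :
    ∀ (u r : List Char), ps.Pairwise (· ≤ ·) → (∀ x ∈ ps, x ≤ u.length) →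
      (ps.reverse).foldl (pvSplice tok) (u ++ r) = pvSegs u tok 0 ps ++ r := by
  induction ps using List.reverseRecOn with
  | nil => intro u r _ _; simp [pvSegs]
  | append_singleton ps q ih =>
      intro u r hpair hle
      have hq : q ≤ u.length := hle q (by simp)
      have hps_le_q : ∀ x ∈ ps, x ≤ q := by
        have := (List.pairwise_append.mp hpair).2.2
        intro x hx; exact this x hx q (by simp)
      have hps_le : ∀ x ∈ ps, x ≤ (u.take q).length := by
        intro x hx
        have h1 := hps_le_q x hx
        simp [List.length_take]; omega
      have hsp : pvSplice tok (u ++ r) q = u.take q ++ (tok ++ (u.drop q ++ r)) := by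
        simp [pvSplice, List.take_append_of_le_length hq, List.drop_append_of_le_length hq]
      rw [List.reverse_append, List.reverse_singleton, List.singleton_append,
        List.foldl_cons, hsp,
        ih (u.take q) (tok ++ (u.drop q ++ r)) (List.Pairwise.sublist (by simp) hpair) hps_le,
        pvSegs_snoc u tok 0 q ps hps_le_q]
      simp

-- A's foldl accumulator, flattened, is the Int-indexed segment decomposition
def pvSegsInt (cs tok : List Char) : Int → List Int → List Char
  | last, [] => PySem.List.slice cs (some last) none
  | last, p :: ps => PySem.List.slice cs (some last) (some p) ++ tok ++ pvSegsInt cs tok p ps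

theorem pvA_foldl (cs tok : List Char) (qs : List Int) :
    ∀ (res : List (List Char)) (last : Int),
      ((qs.foldl (fun (acc : List (List Char) × Int) p =>
          (acc.1 ++ [PySem.List.slice cs (some acc.2) (some p)] ++ [tok], p)) (res, last)).1
        ++ [PySem.List.slice cs (some (qs.foldl (fun (acc : List (List Char) × Int) p =>
          (acc.1 ++ [PySem.List.slice cs (some acc.2) (some p)] ++ [tok], p)) (res, last)).2) none]).flatten
      = res.flatten ++ pvSegsInt cs tok last qs := by
  induction qs with
  | nil => intro res last; simp [pvSegsInt]
  | cons q qs ih =>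
      intro res last
      simp only [List.foldl_cons, ih, pvSegsInt]
      simp

-- Int-indexed segments = Nat-indexed segments, under the range bounds
theorem pvSegsInt_eq (cs tok : List Char) (qs : List Int) :
    ∀ (last : Int), 0 ≤ last → (∀ q ∈ qs, 0 ≤ q) →
      pvSegsInt cs tok last qs = pvSegs cs tok last.toNat (qs.map Int.toNat) := by
  induction qs with
  | nil =>
      intro last hlast _
      simp [pvSegsInt, pvSegs, PySem.List.slice_from _ hlast]
  | cons q qs ih =>
      intro last hlast hq
      have h0q : 0 ≤ q := hq q (by simp)
      rw [List.map_cons]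
      simp only [pvSegsInt, pvSegs]
      rw [PySem.List.slice_toNat cs hlast h0q,
        ih q h0q (fun x hx => hq x (by simp [hx]))]

-- B's Int-splice fold = Nat-splice fold, under nonnegativity
theorem pvB_foldl (tok : List Char) (qs : List Int) (h : ∀ q ∈ qs, 0 ≤ q) :
    ∀ (t : List Char),
      qs.foldl (fun res p => PySem.List.slice res none (some p) ++ tok ++ PySem.List.slice res (some p) none) t
      = (qs.map Int.toNat).foldl (pvSplice tok) t := by
  induction qs with
  | nil => intro t; simp
  | cons q qs ih =>
      intro t
      have h0q : 0 ≤ q := h q (by simp)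
      rw [List.foldl_cons, List.map_cons, List.foldl_cons,
        PySem.List.slice_to _ h0q, PySem.List.slice_from _ h0q,
        ih (fun x hx => h x (by simp [hx]))]
      rfl

-- the descending sort is the reverse of the ascending sort (positions are distinct)
theorem pv_sorted_desc (xs : List Int) :
    PySem.List.sorted (PySem.Set.ofList xs) (fun x => x) true
      = (PySem.List.sorted (PySem.Set.ofList xs) (fun x => x) false).reverse := by
  apply PySem.List.sorted_rev_eq_of_perm_of_pairwise_gt
  · exact (List.reverse_perm _).trans (PySem.List.sorted_perm _ _ _)
  · have := PySem.List.sorted_ofList_pairwise_lt (xs := xs)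
    simpa using List.pairwise_reverse.mpr (this.imp (fun h => h))

-- ===== VERDICT (by name: the statement is the Claim_ definition above) =====
theorem insert_comments_spec : Claim_equal_insert_comments := by
  intro s token pos_list _
  simp only [Spec_insert_comments, insert_comments, insert_comments_alt]
  set cs := s.toList with hcs
  set tok := token.toList with htok
  set ps := pos_list.getD [PySem.Int.floordiv (cs.length : Int) 2] with hps
  set filtered := ps.filter (fun p => decide (0 ≤ p) && decide (p ≤ (cs.length : Int))) with hfil
  set asc := PySem.List.sorted (PySem.Set.ofList filtered) (fun x => x) false with hasc
  -- bounds on every element of the ascending sorted list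
  have hmem : ∀ q ∈ asc, 0 ≤ q ∧ q ≤ (cs.length : Int) := by
    intro q hq
    rw [hasc, PySem.List.mem_sorted] at hq
    have hq' : q ∈ filtered := (PySem.Set.mem_ofList _ _).mp hq
    have := (List.mem_filter.mp hq').2
    simp only [Bool.and_eq_true, decide_eq_true_eq] at this
    exact this
  have h0 : ∀ q ∈ asc, 0 ≤ q := fun q hq => (hmem q hq).1
  have hlen : ∀ x ∈ asc.map Int.toNat, x ≤ cs.length := by
    intro x hx
    obtain ⟨q, hq, rfl⟩ := List.mem_map.mp hx
    have h1 := (hmem q hq).1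
    have h2 := (hmem q hq).2
    omega
  have hpair : (asc.map Int.toNat).Pairwise (· ≤ ·) := by
    have : asc.Pairwise (· < ·) := by
      simpa [hasc] using PySem.List.sorted_ofList_pairwise_lt (xs := filtered)
    exact (List.pairwise_map).mpr (this.imp (fun {a b} h => Int.toNat_le_toNat (le_of_lt h)))
  rw [pv_sorted_desc, ← hasc,
    pvB_foldl tok asc.reverse (fun q hq => h0 q (List.mem_reverse.mp hq))]
  have hrev : asc.reverse.map Int.toNat = (asc.map Int.toNat).reverse := by
    simp [List.map_reverse]
  rw [hrev]
  have hM := pvSplice_reverse tok (asc.map Int.toNat) cs [] hpair hlen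
  rw [List.append_nil] at hM
  rw [hM]
  have hA := pvA_foldl cs tok asc [] 0
  rw [List.flatten_nil, List.nil_append] at hA
  rw [hA, pvSegsInt_eq cs tok asc 0 le_rfl h0]
  simp
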